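-- pv_equiv track=rewrite | github.com/saratavakoli77/codesum_replication | datasets_anyl/sentence_bleu_plots.py | remove_bigrams_from_line
-- ===== SOURCE A (Python) =====
-- def remove_bigrams_from_line(input_line, list_of_removable_bigrams):
--     input_line_split = input_line.split()
--     new_input_line = []
--     prev_token = ""
--     for token in input_line_split:
--         bigram = "{}-{}".format(prev_token, token)
--         if bigram in list_of_removable_bigrams:
--             new_input_line[-1] = "<PAD_TOKEN>"
--             new_input_line += ["<PAD_TOKEN>"]
--         else:
--             new_input_line += [token]
--         prev_token = token
--     return new_input_line
-- ===== SOURCE B (Python) =====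
-- def remove_bigrams_from_line(input_line, list_of_removable_bigrams):
--     tokens = input_line.split()
--     removable = set(list_of_removable_bigrams)
--     matched = ["{}-{}".format(p, t) in removable
--                for p, t in zip([""] + tokens[:-1], tokens)]
--     return ["<PAD_TOKEN>" if matched[i] or (i + 1 < len(tokens) and matched[i + 1])
--             else tokens[i]
--             for i in range(len(tokens))]
-- ===== Notes on version B (the rewrite author's own statement) =====
-- stated objective: alternative
-- what changed: A builds the output sequentially, retroactively overwriting the previously appended element when a bigram matches; B first marks which adjacent bigrams are in the removal set (built once as a set) and then computes every output position independently: pad token i iff its own or the next bigram matched.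
import Mathlib
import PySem

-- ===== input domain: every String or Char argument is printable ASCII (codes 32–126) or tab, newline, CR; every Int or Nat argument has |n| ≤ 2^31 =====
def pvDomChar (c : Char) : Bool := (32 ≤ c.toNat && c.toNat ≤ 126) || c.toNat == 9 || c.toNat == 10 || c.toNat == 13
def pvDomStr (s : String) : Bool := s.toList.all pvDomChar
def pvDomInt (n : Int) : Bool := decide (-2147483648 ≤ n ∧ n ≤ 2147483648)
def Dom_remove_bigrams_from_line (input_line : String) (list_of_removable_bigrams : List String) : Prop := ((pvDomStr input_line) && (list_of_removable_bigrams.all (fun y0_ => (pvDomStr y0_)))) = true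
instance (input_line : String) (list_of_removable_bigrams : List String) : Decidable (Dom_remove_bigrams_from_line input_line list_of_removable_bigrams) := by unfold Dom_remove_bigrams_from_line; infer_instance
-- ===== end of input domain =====

-- B replaces A's sequential loop (which retroactively overwrites the previously
-- appended element) by a two-phase decomposition: mark matching bigrams, then
-- compute every output position independently. Objective: alternative decomposition.
-- A raises IndexError when the very first token's bigram is in the list; Pre_ excludes
-- exactly those inputs (B returns a value there).

-- ===== PORT A =====
-- the loop 'for token in input_line_split: …'; state = (new_input_line, prev_token).
-- 'new_input_line[-1] = "<PAD_TOKEN>"' is ported as dropLast ++ [PAD] (Python raises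
-- IndexError on an empty list there; exactly those inputs are excluded by Pre_).
def pvLoopA (bigs : List String) : List String → List String → String → List String
  | acc, [], _ => acc
  | acc, t :: ts, prev =>
    if bigs.contains (prev ++ "-" ++ t) then
      pvLoopA bigs (acc.dropLast ++ ["<PAD_TOKEN>", "<PAD_TOKEN>"]) ts t
    else
      pvLoopA bigs (acc ++ [t]) ts t

def remove_bigrams_from_line (input_line : String) (list_of_removable_bigrams : List String) : List String :=
  pvLoopA list_of_removable_bigrams [] (PySem.Str.split₀ input_line) ""

-- ===== PORT B =====
def remove_bigrams_from_line_alt (input_line : String) (list_of_removable_bigrams : List String) : List String :=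
  let tokens := PySem.Str.split₀ input_line
  let removable : PySem.Set String := PySem.Set.ofList list_of_removable_bigrams
  let matched := (List.zip ("" :: tokens.dropLast) tokens).map
      (fun pt => PySem.Set.contains removable (pt.1 ++ "-" ++ pt.2))
  (List.range tokens.length).map (fun i =>
    if matched.getD i false || (decide (i + 1 < tokens.length) && matched.getD (i + 1) false)
    then "<PAD_TOKEN>" else tokens.getD i "")

-- ===== PRECONDITION & SPEC =====
-- Pre_ excludes exactly the inputs on which A raises IndexError: a nonempty token
-- list whose first token's bigram ""-token is in the removal list.
def Pre_remove_bigrams_from_line (input_line : String) (list_of_removable_bigrams : List String) : Prop :=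
  ∀ t ∈ (PySem.Str.split₀ input_line).head?, ("-" ++ t) ∉ list_of_removable_bigrams
instance (input_line : String) (list_of_removable_bigrams : List String) : Decidable (Pre_remove_bigrams_from_line input_line list_of_removable_bigrams) := by unfold Pre_remove_bigrams_from_line; infer_instance

def pvWitness_remove_bigrams_from_line : String × List String := ("a b c", ["a-b"])

def Spec_remove_bigrams_from_line (input_line : String) (list_of_removable_bigrams : List String) (out : List String) : Prop := out = remove_bigrams_from_line_alt input_line list_of_removable_bigrams
instance (input_line : String) (list_of_removable_bigrams : List String) (out : List String) : Decidable (Spec_remove_bigrams_from_line input_line list_of_removable_bigrams out) := by unfold Spec_remove_bigrams_from_line; infer_instance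

-- ===== CLAIM (what is proved, stated in full; the proofs are below) =====
def Claim_equal_remove_bigrams_from_line : Prop := ∀ (input_line : String) (list_of_removable_bigrams : List String), Dom_remove_bigrams_from_line input_line list_of_removable_bigrams → Pre_remove_bigrams_from_line input_line list_of_removable_bigrams → Spec_remove_bigrams_from_line input_line list_of_removable_bigrams (remove_bigrams_from_line input_line list_of_removable_bigrams)


-- ===== LEMMAS AND PROOFS =====

-- does the head of ts (with previous token p) match?
def pvHeadM (c : String → Bool) (p : String) : List String → Bool
  | [] => false
  | u :: _ => c (p ++ "-" ++ u)

-- the common intended output: token i padded iff its own bigram or the next one matches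
def pvOut (c : String → Bool) : String → List String → List String
  | _, [] => []
  | p, t :: ts => (if c (p ++ "-" ++ t) || pvHeadM c t ts then "<PAD_TOKEN>" else t) :: pvOut c t ts

def pvMatched (c : String → Bool) (p : String) (ts : List String) : List Bool :=
  (List.zip (p :: ts.dropLast) ts).map (fun pt => c (pt.1 ++ "-" ++ pt.2))

theorem pvMatched_cons (c : String → Bool) (p t : String) (ts : List String) :
    pvMatched c p (t :: ts) = c (p ++ "-" ++ t) :: pvMatched c t ts := by
  cases ts <;> simp [pvMatched]

theorem pvLoopA_eq (bigs : List String) (ts : List String) :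
    ∀ (p : String) (acc : List String),
      pvLoopA bigs acc ts p =
        (if pvHeadM (fun s => bigs.contains s) p ts then acc.dropLast ++ ["<PAD_TOKEN>"] else acc)
          ++ pvOut (fun s => bigs.contains s) p ts := by
  induction ts with
  | nil => intro p acc; simp [pvLoopA, pvHeadM, pvOut]
  | cons t ts ih =>
    intro p acc
    rw [show pvHeadM (fun s => bigs.contains s) p (t :: ts) = bigs.contains (p ++ "-" ++ t) from rfl,
        pvOut]
    by_cases h : bigs.contains (p ++ "-" ++ t) = true
    · rw [pvLoopA, if_pos h, ih, h]
      simp only [Bool.true_or]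
      by_cases h2 : pvHeadM (fun s => bigs.contains s) t ts = true
      · rw [if_pos h2,
          show acc.dropLast ++ ["<PAD_TOKEN>", "<PAD_TOKEN>"]
            = (acc.dropLast ++ ["<PAD_TOKEN>"]) ++ ["<PAD_TOKEN>"] from by simp,
          List.dropLast_concat]
        simp
      · rw [if_neg h2]; simp
    · have hf : bigs.contains (p ++ "-" ++ t) = false := by
        revert h; cases bigs.contains (p ++ "-" ++ t) <;> simp
      rw [pvLoopA, if_neg h, ih, hf]
      simp only [Bool.false_or, Bool.false_eq_true, if_false]
      by_cases h2 : pvHeadM (fun s => bigs.contains s) t ts = true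
      · rw [if_pos h2, if_pos h2, List.dropLast_concat]; simp
      · rw [if_neg h2, if_neg h2]; simp

theorem pvB_eq (c : String → Bool) (ts : List String) :
    ∀ (p : String),
      (List.range ts.length).map (fun i =>
        if (pvMatched c p ts).getD i false
            || (decide (i + 1 < ts.length) && (pvMatched c p ts).getD (i + 1) false)
        then "<PAD_TOKEN>" else ts.getD i "") = pvOut c p ts := by
  induction ts with
  | nil => intro p; simp [pvOut]
  | cons t ts ih =>
    intro p
    rw [List.length_cons, List.range_succ_eq_map, List.map_cons, List.map_map]
    have head : (if (pvMatched c p (t :: ts)).getD 0 false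
        || (decide (0 + 1 < ts.length + 1) && (pvMatched c p (t :: ts)).getD (0 + 1) false)
        then "<PAD_TOKEN>" else (t :: ts).getD 0 "")
        = (if c (p ++ "-" ++ t) || pvHeadM c t ts then "<PAD_TOKEN>" else t) := by
      cases ts <;> simp [pvMatched, pvHeadM]
    have tail : (List.range ts.length).map
        ((fun i =>
          if (pvMatched c p (t :: ts)).getD i false
              || (decide (i + 1 < ts.length + 1) && (pvMatched c p (t :: ts)).getD (i + 1) false)
          then "<PAD_TOKEN>" else (t :: ts).getD i "") ∘ Nat.succ)
        = (List.range ts.length).map (fun i =>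
          if (pvMatched c t ts).getD i false
              || (decide (i + 1 < ts.length) && (pvMatched c t ts).getD (i + 1) false)
          then "<PAD_TOKEN>" else ts.getD i "") := by
      apply List.map_congr_left
      intro i _
      simp [pvMatched_cons]
    rw [head, tail, ih]
    rfl

theorem pvSet_contains_ofList (bigs : List String) (x : String) :
    PySem.Set.contains (PySem.Set.ofList bigs) x = bigs.contains x := by
  simp [PySem.Set.contains_eq_listContains, PySem.Set.mem_ofList]

-- ===== VERDICT (by name: the statement is the Claim_ definition above) =====
theorem remove_bigrams_from_line_spec : Claim_equal_remove_bigrams_from_line := by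
  intro input_line bigs _ hpre
  unfold Pre_remove_bigrams_from_line at hpre
  dsimp only [Spec_remove_bigrams_from_line, remove_bigrams_from_line, remove_bigrams_from_line_alt]
  generalize hg : PySem.Str.split₀ input_line = ts at hpre ⊢
  have hcf : (fun s => PySem.Set.contains (PySem.Set.ofList bigs) s) = (fun s => bigs.contains s) := by
    funext s; exact pvSet_contains_ofList bigs s
  have hB := pvB_eq (fun s => PySem.Set.contains (PySem.Set.ofList bigs) s) ts ""
  simp only [pvMatched] at hB
  have hhead : pvHeadM (fun s => bigs.contains s) "" ts = false := by
    cases ts with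
    | nil => rfl
    | cons t ts' =>
      have hmem : ("-" ++ t) ∉ bigs := hpre t rfl
      simp only [pvHeadM]
      rw [show ("" : String) ++ "-" ++ t = "-" ++ t by simp]
      simp [hmem]
  rw [pvLoopA_eq bigs ts "" [], hhead]
  simp only [Bool.false_eq_true, if_false, List.nil_append]
  rw [← hcf]
  exact hB.symm
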